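/- GENERATED by tools/from_farm_form.py from prooffarm-gif/accepted/DGifGetScreenDesc.4/Proof.lean (a worked proof of the farm's unit `DGifGetScreenDesc.4`,
   accepted by the verdict) — do not edit. -/
import Gif.Spec.Units.DGifGetScreenDesc_4
import Gif.Spec.AllSegs
import Gif.Spec.Proved.DGifGetScreenDesc_4_Lemmas

open X86 X86.User Asan ProgX.Base ProgX.Base.Spec Gif.Spec

/-!
  `DGifGetScreenDesc.4` (0x108211 … 0x108253 and 0x108315 … 0x10832a, 21 instructions; dgif_lib.c:280-288): a body segment of a
  protected function with a call in the middle. The return address 0x108225 (`ret15`) of `GifMakeMapObject(1 << BitsPerPixel, NULL)`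
  is made a cut of the unit's own (the private assertion `sd4_AtRet15`); behind it the code branches on the result: NULL goes to
  the epilogue (`Exit`), a map is adopted and the colour loop's head is reached (`Head`). One lemma per walk (Lemmas.lean),
  chained here.
-/

/-- Segment 4 of `DGifGetScreenDesc` takes `AtMake` at 0x108211 to `Head` at 0x108253 or to `Exit` at 0x1080f7. -/
theorem Gif.Spec.Proved.DGifGetScreenDesc_4_ok : Gif.Spec.DGifGetScreenDesc_4.Statement := by
  intro Lay hLay μ hμ u₀ hcode h_GifMakeMapObject h_asan_store8_noabort h_asan_store1_noabort h_asan_store4_noabort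
  intro H rest frames F R e ret v hat
  -- the callee's contract for the frame list of the body (the own frame in front) and the count `1 << BitsPerPixel`
  have hmk := h_GifMakeMapObject H rest (DGifGetScreenDesc.framesIn frames e) (2 ^ (v.reg .r12).toNat)
  -- 0x108211 … the call … 0x108225 (ret15)
  refine (Gif.Spec.DGifGetScreenDesc_4.sd4_seg_call Lay hLay μ hμ u₀ hcode H rest frames F R e ret _ hmk v hat rfl).trans ?_
  intro v1 hv1
  obtain ⟨Hc, hret⟩ := hv1
  -- dgif_lib.c:281 `if (GifFile->SColorMap == NULL)`: the two arms
  rcases hret.res with hnull | ⟨colors, hl1, hl2, hn1, hn2, hne, hcc, hcol, hc2, hc256⟩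
  · -- 0x108225 … 0x108238, 0x108315 … 0x1080f7: NULL, to the epilogue
    refine ReachVia.mono ?_ (fun w hw => Or.inr hw)
    exact Gif.Spec.DGifGetScreenDesc_4.sd4_seg_null Lay hLay μ hμ u₀ hcode H rest frames F R e ret Hc _
      h_asan_store8_noabort h_asan_store4_noabort v1 hret hnull
  · -- 0x108225 … 0x108253: the adoption, to the loop head
    refine ReachVia.mono ?_ (fun w hw => Or.inl hw)
    exact Gif.Spec.DGifGetScreenDesc_4.sd4_seg_map Lay hLay μ hμ u₀ hcode H rest frames F R e ret Hc _
      h_asan_store8_noabort h_asan_store1_noabort v1 hret colors hl1 hl2 hn1 hn2 hne hcc hcol hc2 hc256
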